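-- pv_equiv track=rewrite | github.com/JoaoOliveira1201/FoodOracle | backend/ia/seasonal_suggestions/src/seasonal_analyzer.py | analyze_by_product_type
-- ===== SOURCE A (Python) =====
-- def analyze_by_product_type(product_name: str) -> str:
--     """Analyze seasonal demand based on general product type patterns"""
--
--     # Summer fruits and vegetables
--     summer_indicators = [
--         "tomato",
--         "pepper",
--         "cucumber",
--         "melon",
--         "watermelon",
--         "peach",
--         "nectarine",
--         "apricot",
--         "plum",
--         "cherry",
--         "grape",
--         "fig",
--         "berry",
--         "stone fruit",
--     ]
--
--     # Winter/hearty vegetables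
--     winter_indicators = [
--         "cabbage",
--         "cauliflower",
--         "broccoli",
--         "brussels",
--         "kale",
--         "chard",
--         "leek",
--         "turnip",
--         "parsnip",
--         "beet",
--         "pumpkin",
--         "squash",
--         "sweet potato",
--     ]
--
--     # Root vegetables (moderate year-round)
--     root_indicators = ["potato", "onion", "garlic", "carrot", "radish"]
--
--     # Leafy greens (moderate year-round)
--     leafy_indicators = ["lettuce", "spinach", "arugula", "herb"]
--
--     # Check for patterns
--     if any(indicator in product_name for indicator in summer_indicators):
--         return "high"  # Summer products are high demand in summer
--     elif any(indicator in product_name for indicator in winter_indicators):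
--         return "moderate"  # Winter vegetables are moderate in summer
--     elif any(
--         indicator in product_name for indicator in root_indicators + leafy_indicators
--     ):
--         return "moderate"  # Root vegetables and leafy greens are moderate year-round
--     else:
--         return "moderate"  # Default to moderate for unknown products
-- ===== SOURCE B (Python) =====
-- def analyze_by_product_type(product_name: str) -> str:
--     """Text-directed scan: walk the positions of product_name once and test, at
--     each position, whether some summer keyword starts there (every non-summer
--     branch of the original returns "moderate", so only the summer check matters)."""
--     summer_indicators = [
--         "tomato", "pepper", "cucumber", "melon", "watermelon", "peach",
--         "nectarine", "apricot", "plum", "cherry", "grape", "fig", "berry",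
--         "stone fruit",
--     ]
--     for i in range(len(product_name)):
--         for kw in summer_indicators:
--             if product_name.startswith(kw, i):
--                 return "high"
--     return "moderate"
-- ===== Notes on version B (the rewrite author's own statement) =====
-- stated objective: alternative
-- what changed: B inverts the traversal: instead of A's keyword-directed cascade of four substring scans over 36 keywords (three of whose branches return the same default label), B walks the text positions once and tests at each position whether a summer keyword starts there, returning the high label on first match and the default label otherwise; the winter/root/leafy lists disappear because their branches equal the default.
import Mathlib
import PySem

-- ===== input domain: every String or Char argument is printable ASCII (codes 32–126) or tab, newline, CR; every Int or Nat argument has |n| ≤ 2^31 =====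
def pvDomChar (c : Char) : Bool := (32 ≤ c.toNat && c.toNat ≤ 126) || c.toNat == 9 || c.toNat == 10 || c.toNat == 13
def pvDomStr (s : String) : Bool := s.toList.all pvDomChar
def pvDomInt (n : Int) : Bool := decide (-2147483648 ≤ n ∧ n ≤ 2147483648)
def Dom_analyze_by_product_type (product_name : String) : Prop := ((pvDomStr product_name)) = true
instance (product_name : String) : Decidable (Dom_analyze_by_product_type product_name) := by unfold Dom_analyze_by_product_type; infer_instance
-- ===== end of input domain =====

-- B replaces A's keyword-directed branch cascade by a single position-directed scan of the
-- text, testing at each position whether a summer keyword starts there (objective: alternative).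


-- ===== PORT A =====
def pvSummerIndicators : List String :=
  ["tomato", "pepper", "cucumber", "melon", "watermelon", "peach", "nectarine",
   "apricot", "plum", "cherry", "grape", "fig", "berry", "stone fruit"]

def pvWinterIndicators : List String :=
  ["cabbage", "cauliflower", "broccoli", "brussels", "kale", "chard", "leek",
   "turnip", "parsnip", "beet", "pumpkin", "squash", "sweet potato"]

def pvRootIndicators : List String := ["potato", "onion", "garlic", "carrot", "radish"]

def pvLeafyIndicators : List String := ["lettuce", "spinach", "arugula", "herb"]

def analyze_by_product_type (product_name : String) : String :=
  if pvSummerIndicators.any (fun ind => PySem.Str.isIn ind product_name) then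
    "high"
  else if pvWinterIndicators.any (fun ind => PySem.Str.isIn ind product_name) then
    "moderate"
  else if (pvRootIndicators ++ pvLeafyIndicators).any (fun ind => PySem.Str.isIn ind product_name) then
    "moderate"
  else
    "moderate"

-- ===== PORT B =====
def pvSummerKeywords : List (List Char) :=
  ["tomato", "pepper", "cucumber", "melon", "watermelon", "peach", "nectarine",
   "apricot", "plum", "cherry", "grape", "fig", "berry", "stone fruit"].map String.toList

-- the position loop of Source B: at each suffix, does some keyword start here?
def pvScanB : List Char → Bool
  | [] => false
  | c :: t => pvSummerKeywords.any (fun kw => kw.isPrefixOf (c :: t)) || pvScanB t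

def analyze_by_product_type_alt (product_name : String) : String :=
  if pvScanB product_name.toList then "high" else "moderate"

-- ===== PRECONDITION & SPEC =====
def Spec_analyze_by_product_type (product_name : String) (out : String) : Prop := out = analyze_by_product_type_alt product_name
instance (product_name : String) (out : String) : Decidable (Spec_analyze_by_product_type product_name out) := by unfold Spec_analyze_by_product_type; infer_instance

-- ===== CLAIM (what is proved, stated in full; the proofs are below) =====
def Claim_equal_analyze_by_product_type : Prop := ∀ (product_name : String), Dom_analyze_by_product_type product_name → Spec_analyze_by_product_type product_name (analyze_by_product_type product_name)

-- ===== LEMMAS AND PROOFS =====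

-- the position scan finds exactly the keywords occurring as an infix (all keywords are nonempty)
theorem pvScanB_eq_any_infix (l : List Char) :
    pvScanB l = pvSummerKeywords.any (fun kw => decide (kw <:+: l)) := by
  induction l with
  | nil => decide
  | cons c t ih =>
      rw [pvScanB, ih, Bool.eq_iff_iff]
      simp only [Bool.or_eq_true, List.any_eq_true, decide_eq_true_eq,
        List.isPrefixOf_iff_prefix, List.infix_cons_iff]
      constructor
      · rintro (⟨x, h, p⟩ | ⟨x, h, i⟩)
        exacts [⟨x, h, Or.inl p⟩, ⟨x, h, Or.inr i⟩]
      · rintro ⟨x, h, p | i⟩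
        exacts [Or.inl ⟨x, h, p⟩, Or.inr ⟨x, h, i⟩]

theorem pvScan_eq_isIn (s : String) :
    pvScanB s.toList = pvSummerIndicators.any (fun ind => PySem.Str.isIn ind s) := by
  rw [pvScanB_eq_any_infix, Bool.eq_iff_iff]
  show ((pvSummerIndicators.map String.toList).any _ = true) ↔ _
  simp only [List.any_map, List.any_eq_true, Function.comp, decide_eq_true_eq]
  constructor
  · rintro ⟨ind, hmem, hinf⟩
    exact ⟨ind, hmem, (PySem.Str.isIn_iff_infix ind s).mpr hinf⟩
  · rintro ⟨ind, hmem, h⟩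
    exact ⟨ind, hmem, (PySem.Str.isIn_iff_infix ind s).mp h⟩

-- ===== VERDICT (by name: the statement is the Claim_ definition above) =====
theorem analyze_by_product_type_spec : Claim_equal_analyze_by_product_type := by
  intro p _
  unfold Spec_analyze_by_product_type analyze_by_product_type analyze_by_product_type_alt
  rw [pvScan_eq_isIn]
  split_ifs <;> rfl
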